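-- pv_equiv track=rewrite | github.com/FEDso/CheckioPython | Ice Base/string_conversion.py | steps_to_convert
-- ===== SOURCE A (Python) =====
-- def steps_to_convert(line1, line2):
--     n1, n2 = len(line1), len(line2)
--     NW = [[0 for _ in range(n2+1)] for _ in range(n1+1)]
--     for i in range (n1+1):
--         NW[i][0] = 0
--     for k in range(n2 + 1):
--         NW[0][k] = 0
--
--     for i in range(1, n1 + 1):
--         for k in range(1, n2 + 1):
--             if line1[i-1] == line2[k-1]:
--                 NW[i][k] = NW[i-1][k-1] + 1
--             else:
--                 match = NW[i-1][k-1] + 1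
--                 delete = NW[i-1][k]
--                 insert = NW[i][k-1]
--                 NW[i][k] = max(insert, delete)
--     return max(n1, n2) - NW[-1][-1]
-- ===== SOURCE B (Python) =====
-- def steps_to_convert(line1, line2):
--     # Demand-driven top-down evaluation of the LCS recurrence: an explicit
--     # work stack with (i, k, ready) frames and a dict memo, instead of
--     # filling a full bottom-up table.  Only subproblems actually required
--     # by (n1, n2) are ever computed, and no recursion depth is needed.
--     n1, n2 = len(line1), len(line2)
--     memo = {}
--     stack = [(n1, n2, False)]
--     while stack:
--         i, k, ready = stack.pop()
--         if (i, k) in memo: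
--             continue
--         if i == 0 or k == 0:
--             memo[(i, k)] = 0
--         elif line1[i - 1] == line2[k - 1]:
--             if ready:
--                 memo[(i, k)] = memo[(i - 1, k - 1)] + 1
--             else:
--                 stack.append((i, k, True))
--                 stack.append((i - 1, k - 1, False))
--         else:
--             if ready:
--                 memo[(i, k)] = max(memo[(i - 1, k)], memo[(i, k - 1)])
--             else:
--                 stack.append((i, k, True))
--                 stack.append((i - 1, k, False))
--                 stack.append((i, k - 1, False))
--     return max(n1, n2) - memo[(n1, n2)]
-- ===== Notes on version B (the rewrite author's own statement) =====
-- stated objective: alternative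
-- what changed: B replaces A's bottom-up fill of the full (n1+1)x(n2+1) LCS table by a demand-driven top-down evaluation of the same recurrence: an explicit work stack of (i,k,ready) frames with a dict memo computes only the subproblems reachable from (n1,n2), with no recursion and no 2D table.
import Mathlib
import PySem

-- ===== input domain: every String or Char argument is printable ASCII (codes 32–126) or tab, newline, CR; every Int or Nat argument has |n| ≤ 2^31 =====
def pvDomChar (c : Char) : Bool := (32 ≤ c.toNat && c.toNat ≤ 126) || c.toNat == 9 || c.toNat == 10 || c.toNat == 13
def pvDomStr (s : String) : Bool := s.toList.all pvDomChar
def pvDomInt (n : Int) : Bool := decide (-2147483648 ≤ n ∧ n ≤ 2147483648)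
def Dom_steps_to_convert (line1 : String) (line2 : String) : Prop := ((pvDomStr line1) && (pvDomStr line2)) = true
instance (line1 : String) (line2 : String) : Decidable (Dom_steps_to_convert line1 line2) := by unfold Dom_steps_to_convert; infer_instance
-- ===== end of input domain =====

-- B replaces A's bottom-up fill of the full (n1+1)×(n2+1) LCS table by a demand-driven
-- top-down evaluation: an explicit work stack of (i,k,ready) frames with a dict memo —
-- alternative decomposition, no 2D table.

-- ===== PORT A =====
-- NW[i][k] = v  (indices always in range in A, so plain set is exact)
def pvSet2 (NW : List (List Int)) (i k : Nat) (v : Int) : List (List Int) :=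
  NW.set i ((NW.getD i []).set k v)

-- NW[i][k]  (indices always in range in A, so getD is exact)
def pvGet2 (NW : List (List Int)) (i k : Nat) : Int :=
  (NW.getD i []).getD k 0

-- the body of A's inner k-loop (the dead local `match` of A is kept as `_matchv`)
def pvAInner (a b : List Char) (i : Nat) (NW : List (List Int)) (k : Nat) : List (List Int) :=
  if a.getD (i-1) ' ' == b.getD (k-1) ' ' then
    pvSet2 NW i k (pvGet2 NW (i-1) (k-1) + 1)
  else
    let _matchv := pvGet2 NW (i-1) (k-1) + 1
    let del := pvGet2 NW (i-1) k
    let ins := pvGet2 NW i (k-1)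
    pvSet2 NW i k (max ins del)

-- literal port of A: builds the full table; `range(1, n+1)` has nonnegative
-- bounds throughout, so `List.range'` over Nat is exact.
def steps_to_convert (line1 : String) (line2 : String) : Int :=
  let a := line1.toList
  let b := line2.toList
  let n1 := a.length
  let n2 := b.length
  let NW0 : List (List Int) :=
    (List.range (n1+1)).map (fun _ => (List.range (n2+1)).map (fun _ => (0:Int)))
  let NW1 := (List.range (n1+1)).foldl (fun NW i => pvSet2 NW i 0 0) NW0
  let NW2 := (List.range (n2+1)).foldl (fun NW k => pvSet2 NW 0 k 0) NW1
  let NW3 := (List.range' 1 n1).foldl (fun NW i => (List.range' 1 n2).foldl (pvAInner a b i) NW) NW2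
  max (n1 : Int) (n2 : Int) - pvGet2 NW3 n1 n2

-- ===== PORT B =====
-- a work-stack frame (i, k, ready); the Python list's END is the stack top, modelled
-- as the HEAD of the Lean list (push/pop at the front), the standard transliteration.
-- Indices are nonnegative throughout (they start at the lengths and only step down,
-- guarded by i == 0 / k == 0), so Nat is exact for them.

-- termination measure: frame weight 4^(i+k) for a ready frame, 4^(i+k+1) for a fresh one
def pvWeight (e : Nat × Nat × Bool) : Nat :=
  if e.2.2 then 4 ^ (e.1 + e.2.1) else 4 ^ (e.1 + e.2.1 + 1)

def pvPhi (st : List (Nat × Nat × Bool)) : Nat := (st.map pvWeight).sum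

theorem pvPhi_cons (e : Nat × Nat × Bool) (st : List (Nat × Nat × Bool)) :
    pvPhi (e :: st) = pvWeight e + pvPhi st := by
  simp [pvPhi]

-- the while loop of Source B; `memo[child]` is read only when the child is present
-- (proved below), so `getD _ 0` is exact there.
def pvRun (a b : List Char) : List (Nat × Nat × Bool) → PySem.Dict (Nat × Nat) Int → PySem.Dict (Nat × Nat) Int
  | [], m => m
  | (i, k, ready) :: st, m =>
    if m.contains (i, k) then pvRun a b st m
    else if i = 0 ∨ k = 0 then pvRun a b st (m.insert (i, k) 0)
    else if a.getD (i-1) ' ' == b.getD (k-1) ' ' then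
      match ready with
      | true => pvRun a b st (m.insert (i, k) (m.getD (i-1, k-1) 0 + 1))
      | false => pvRun a b ((i-1, k-1, false) :: (i, k, true) :: st) m
    else
      match ready with
      | true => pvRun a b st (m.insert (i, k) (max (m.getD (i-1, k) 0) (m.getD (i, k-1) 0)))
      | false => pvRun a b ((i, k-1, false) :: (i-1, k, false) :: (i, k, true) :: st) m
termination_by st _ => pvPhi st
decreasing_by
  all_goals first
  | (have h : 0 < pvWeight (i, k, ready) := by unfold pvWeight; split <;> positivity
     simp only [pvPhi_cons]; omega)
  | (have h : 0 < pvWeight (i, k, true) := by unfold pvWeight; split <;> positivity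
     simp only [pvPhi_cons]; omega)
  | (rename_i hz _
     have hi : 1 ≤ i ∧ 1 ≤ k := by constructor <;> (by_contra hcon; exact hz (by omega))
     simp only [pvPhi_cons, pvWeight]
     simp only [if_pos, if_neg, Bool.false_eq_true, not_false_iff]
     have e2 : 4 ^ ((i-1) + (k-1) + 1) ≤ 4 ^ (i+k) := Nat.pow_le_pow_right (by norm_num) (by omega)
     have e2' : 4 ^ (i + (k-1) + 1) ≤ 4 ^ (i+k) := Nat.pow_le_pow_right (by norm_num) (by omega)
     have e2'' : 4 ^ ((i-1) + k + 1) ≤ 4 ^ (i+k) := Nat.pow_le_pow_right (by norm_num) (by omega)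
     have e3 : 4 ^ (i + k + 1) = 4 * 4 ^ (i + k) := by rw [pow_succ]; ring
     have e4 : 0 < 4 ^ (i + k) := by positivity
     omega)

-- literal port of Source B
def steps_to_convert_alt (line1 : String) (line2 : String) : Int :=
  let a := line1.toList
  let b := line2.toList
  let n1 := a.length
  let n2 := b.length
  let memo := pvRun a b [(n1, n2, false)] PySem.Dict.empty
  -- memo[(n1, n2)] is always present on exit (proved below), so getD is exact
  max (n1 : Int) (n2 : Int) - memo.getD (n1, n2) 0

-- ===== PRECONDITION & SPEC =====
def Spec_steps_to_convert (line1 : String) (line2 : String) (out : Int) : Prop := out = steps_to_convert_alt line1 line2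
instance (line1 : String) (line2 : String) (out : Int) : Decidable (Spec_steps_to_convert line1 line2 out) := by unfold Spec_steps_to_convert; infer_instance

-- ===== CLAIM (what is proved, stated in full; the proofs are below) =====
def Claim_equal_steps_to_convert : Prop := ∀ (line1 : String) (line2 : String), Dom_steps_to_convert line1 line2 → Spec_steps_to_convert line1 line2 (steps_to_convert line1 line2)

-- ===== LEMMAS AND PROOFS =====

-- the common mathematical object: LCS length of the length-i prefix of a and length-k prefix of b
def pvL (a b : List Char) : Nat → Nat → Int
  | 0, _ => 0
  | _+1, 0 => 0
  | i+1, k+1 =>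
    if a.getD i ' ' == b.getD k ' ' then pvL a b i k + 1
    else max (pvL a b (i+1) k) (pvL a b i (k+1))
termination_by i k => i + k

theorem pvL_zero_left (a b : List Char) (k : Nat) : pvL a b 0 k = 0 := by
  cases k <;> simp [pvL]

theorem pvL_zero_right (a b : List Char) (i : Nat) : pvL a b i 0 = 0 := by
  cases i <;> simp [pvL]

theorem pvL_succ (a b : List Char) (j k : Nat) :
    pvL a b (j+1) (k+1) =
      if a.getD j ' ' == b.getD k ' ' then pvL a b j k + 1
      else max (pvL a b (j+1) k) (pvL a b j (k+1)) := by
  rw [pvL]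

-- row i of the DP table
def pvRow (a b : List Char) (n2 i : Nat) : List Int :=
  (List.range (n2+1)).map (fun k => pvL a b i k)

theorem pvRow_zero (a b : List Char) (n2 : Nat) :
    pvRow a b n2 0 = List.replicate (n2+1) 0 := by
  simp [pvRow, pvL_zero_left]

-- generic list lemmas ----------------------------------------------------------

theorem mapRange_getD {α : Type} (f : Nat → α) (n i : Nat) (d : α) (h : i < n) :
    ((List.range n).map f).getD i d = f i := by
  rw [List.getD_eq_getElem?_getD]
  simp [h]

theorem mapRange_set {α : Type} (f : Nat → α) (n i : Nat) (v : α) :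
    ((List.range n).map f).set i v = (List.range n).map (fun j => if j = i then v else f j) := by
  apply List.ext_getElem?
  intro j
  by_cases hj : j < n
  · by_cases hji : j = i
    · subst hji
      simp [hj]
    · simp [hj, hji, Ne.symm hji]
  · simp [hj]

theorem foldl_fixed {α β : Type} (f : β → α → β) (z : β) (l : List α) (h : ∀ x, f z x = z) :
    l.foldl f z = z := by
  induction l with
  | nil => rfl
  | cons a t ih => simp [List.foldl, h, ih]

-- ===== A-side: the table fill computes pvRow in every completed row ===========

-- the table after the outer loop has completed rows 1..i
def pvTab (a b : List Char) (n1 n2 i : Nat) : List (List Int) :=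
  (List.range (n1+1)).map (fun j => if j ≤ i then pvRow a b n2 j else List.replicate (n2+1) 0)

-- the table while the inner loop has completed cells 1..k of row i (1 ≤ i)
def pvPartRow (a b : List Char) (n2 i k : Nat) : List Int :=
  (List.range (n2+1)).map (fun k' => if k' ≤ k then pvL a b i k' else 0)

def pvTabP (a b : List Char) (n1 n2 i k : Nat) : List (List Int) :=
  (List.range (n1+1)).map (fun j =>
    if j < i then pvRow a b n2 j
    else if j = i then pvPartRow a b n2 i k
    else List.replicate (n2+1) 0)

theorem pvTabP_zero (a b : List Char) (n1 n2 i : Nat) (hi : 1 ≤ i) :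
    pvTabP a b n1 n2 i 0 = pvTab a b n1 n2 (i-1) := by
  unfold pvTabP pvTab
  apply List.map_congr_left
  intro j _
  rcases lt_trichotomy j i with h | h | h
  · have : j ≤ i - 1 := by omega
    simp [h, this]
  · subst h
    rw [if_neg (lt_irrefl j), if_pos rfl, if_neg (by omega : ¬ j ≤ j - 1)]
    unfold pvPartRow
    have hz : ∀ k' ∈ List.range (n2+1), (if k' ≤ 0 then pvL a b j k' else 0) = (0:Int) := by
      intro k' _
      by_cases hk : k' ≤ 0
      · have : k' = 0 := by omega
        subst this
        simp [pvL_zero_right]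
      · simp [hk]
    rw [List.map_congr_left hz]
    simp
  · have h1 : ¬ j < i := by omega
    have h2 : j ≠ i := by omega
    have h3 : ¬ j ≤ i - 1 := by omega
    simp [h1, h2, h3]

theorem pvTabP_full (a b : List Char) (n1 n2 i : Nat) :
    pvTabP a b n1 n2 i n2 = pvTab a b n1 n2 i := by
  unfold pvTabP pvTab
  apply List.map_congr_left
  intro j _
  rcases lt_trichotomy j i with h | h | h
  · simp [h, le_of_lt h]
  · subst h
    rw [if_neg (lt_irrefl j), if_pos rfl, if_pos (le_refl j)]
    unfold pvPartRow pvRow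
    apply List.map_congr_left
    intro k' hk'
    have : k' ≤ n2 := by
      have := List.mem_range.mp hk'; omega
    simp [this]
  · have h1 : ¬ j < i := by omega
    have h2 : j ≠ i := by omega
    have h3 : ¬ j ≤ i := by omega
    simp [h1, h2, h3]

-- reads from the partial table
theorem pvTabP_get_prev (a b : List Char) (n1 n2 i k k' : Nat)
    (hi : 1 ≤ i) (hin : i ≤ n1) (hk' : k' ≤ n2) :
    pvGet2 (pvTabP a b n1 n2 i k) (i-1) k' = pvL a b (i-1) k' := by
  unfold pvGet2 pvTabP
  rw [mapRange_getD _ _ _ _ (by omega), if_pos (by omega : i - 1 < i)]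
  rw [pvRow, mapRange_getD _ _ _ _ (by omega)]

theorem pvTabP_get_cur (a b : List Char) (n1 n2 i k k' : Nat)
    (hin : i ≤ n1) (hk' : k' ≤ k) (hk'2 : k' ≤ n2) :
    pvGet2 (pvTabP a b n1 n2 i k) i k' = pvL a b i k' := by
  unfold pvGet2 pvTabP
  rw [mapRange_getD _ _ _ _ (by omega), if_neg (lt_irrefl i), if_pos rfl]
  rw [pvPartRow, mapRange_getD _ _ _ _ (by omega), if_pos hk']

-- writing cell (i, k+1) with the right value advances the partial table
theorem pvTabP_set (a b : List Char) (n1 n2 i k : Nat)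
    (hin : i ≤ n1) :
    pvSet2 (pvTabP a b n1 n2 i k) i (k+1) (pvL a b i (k+1)) = pvTabP a b n1 n2 i (k+1) := by
  unfold pvSet2
  conv_lhs => rw [pvTabP]
  rw [mapRange_getD _ _ _ _ (by omega), if_neg (lt_irrefl i), if_pos rfl]
  rw [pvPartRow, mapRange_set, mapRange_set, pvTabP]
  apply List.map_congr_left
  intro j _
  by_cases hj : j = i
  · subst hj
    rw [if_pos rfl, if_neg (lt_irrefl j), if_pos rfl, pvPartRow]
    apply List.map_congr_left
    intro k' _
    by_cases h : k' = k + 1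
    · subst h
      simp
    · rw [if_neg h]
      by_cases h2 : k' ≤ k
      · rw [if_pos h2, if_pos (by omega)]
      · rw [if_neg h2, if_neg (by omega)]
  · rw [if_neg hj]
    by_cases hlt : j < i <;> simp [hj, hlt]

-- one inner step
theorem pvAInner_step (a b : List Char) (n1 n2 i k : Nat)
    (hi : 1 ≤ i) (hin : i ≤ n1) (hk : k + 1 ≤ n2) :
    pvAInner a b i (pvTabP a b n1 n2 i k) (k+1) = pvTabP a b n1 n2 i (k+1) := by
  obtain ⟨j, rfl⟩ : ∃ j, i = j + 1 := ⟨i - 1, by omega⟩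
  unfold pvAInner
  have hs : (j + 1) - 1 = j := by omega
  have hs2 : (k + 1) - 1 = k := by omega
  rw [hs, hs2]
  have hprev1 := pvTabP_get_prev a b n1 n2 (j+1) k k (by omega) hin (by omega)
  have hprev2 := pvTabP_get_prev a b n1 n2 (j+1) k (k+1) (by omega) hin (by omega)
  have hcur := pvTabP_get_cur a b n1 n2 (j+1) k k hin (le_refl k) (by omega)
  rw [hs] at hprev1 hprev2
  by_cases hc : a.getD j ' ' == b.getD k ' '
  · rw [if_pos hc, hprev1, ← pvTabP_set a b n1 n2 (j+1) k hin]
    congr 1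
    rw [pvL_succ, if_pos hc]
  · rw [if_neg hc]
    show pvSet2 (pvTabP a b n1 n2 (j+1) k) (j+1) (k+1)
        (max (pvGet2 (pvTabP a b n1 n2 (j+1) k) (j+1) k)
             (pvGet2 (pvTabP a b n1 n2 (j+1) k) j (k+1))) = _
    rw [hcur, hprev2, ← pvTabP_set a b n1 n2 (j+1) k hin]
    congr 1
    rw [pvL_succ, if_neg hc]

-- the inner loop fills row i
theorem pvAInner_fold (a b : List Char) (n1 n2 i : Nat)
    (hi : 1 ≤ i) (hin : i ≤ n1) :
    ∀ k, k ≤ n2 →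
      (List.range' 1 k).foldl (pvAInner a b i) (pvTab a b n1 n2 (i-1)) = pvTabP a b n1 n2 i k := by
  intro k
  induction k with
  | zero => intro _; simp [pvTabP_zero a b n1 n2 i hi]
  | succ m ih =>
    intro hm
    have hrange : List.range' 1 (m+1) = List.range' 1 m ++ [m+1] := by
      rw [List.range'_concat]
      simp [Nat.add_comm]
    rw [hrange, List.foldl_append, ih (by omega)]
    simp [List.foldl]
    exact pvAInner_step a b n1 n2 i m hi hin (by omega)

-- the outer loop fills rows 1..i
theorem pvAOuter_fold (a b : List Char) (n1 n2 : Nat) :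
    ∀ i, i ≤ n1 →
      (List.range' 1 i).foldl (fun NW i' => (List.range' 1 n2).foldl (pvAInner a b i') NW)
        (pvTab a b n1 n2 0) = pvTab a b n1 n2 i := by
  intro i
  induction i with
  | zero => intro _; rfl
  | succ m ih =>
    intro hm
    have hrange : List.range' 1 (m+1) = List.range' 1 m ++ [m+1] := by
      rw [List.range'_concat]
      simp [Nat.add_comm]
    rw [hrange, List.foldl_append, ih (by omega)]
    simp [List.foldl]
    have h0 : (m+1) - 1 = m := by omega
    have := pvAInner_fold a b n1 n2 (m+1) (by omega) (by omega) n2 (le_refl n2)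
    rw [h0] at this
    rw [this, pvTabP_full]

-- the zero table is pvTab 0, and the two zeroing loops keep it unchanged
theorem pvZeroTab (a b : List Char) (n1 n2 : Nat) :
    pvTab a b n1 n2 0 = List.replicate (n1+1) (List.replicate (n2+1) 0) := by
  unfold pvTab
  have : ∀ j ∈ List.range (n1+1),
      (if j ≤ 0 then pvRow a b n2 j else List.replicate (n2+1) 0) = List.replicate (n2+1) (0:Int) := by
    intro j _
    by_cases h : j ≤ 0
    · have : j = 0 := by omega
      subst this
      simp [pvRow_zero]
    · simp [h]
  rw [List.map_congr_left this]
  simp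

theorem pvSet2_zero (n1 n2 i k : Nat) :
    pvSet2 (List.replicate (n1+1) (List.replicate (n2+1) (0:Int))) i k 0 =
      List.replicate (n1+1) (List.replicate (n2+1) 0) := by
  unfold pvSet2
  by_cases h : i < n1 + 1
  · rw [List.getD_eq_getElem?_getD]
    simp [h, List.set_replicate_self]
  · have : (List.replicate (n1+1) (List.replicate (n2+1) (0:Int))).length ≤ i := by simp; omega
    rw [List.set_eq_of_length_le this]

-- A computes max(n1,n2) − pvL n1 n2
theorem steps_A_eq (line1 line2 : String) :
    steps_to_convert line1 line2 =
      max (line1.toList.length : Int) (line2.toList.length : Int)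
        - pvL line1.toList line2.toList line1.toList.length line2.toList.length := by
  simp only [steps_to_convert]
  set a := line1.toList
  set b := line2.toList
  set n1 := a.length
  set n2 := b.length
  have hZ0 : ((List.range (n1+1)).map (fun _ => (List.range (n2+1)).map (fun _ => (0:Int)))) =
      List.replicate (n1+1) (List.replicate (n2+1) 0) := by simp
  rw [hZ0]
  rw [foldl_fixed (fun NW i => pvSet2 NW i 0 0)
        (List.replicate (n1+1) (List.replicate (n2+1) 0)) (List.range (n1+1))
        (fun i => pvSet2_zero n1 n2 i 0)]
  rw [foldl_fixed (fun NW k => pvSet2 NW 0 k 0)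
        (List.replicate (n1+1) (List.replicate (n2+1) 0)) (List.range (n2+1))
        (fun k => pvSet2_zero n1 n2 0 k)]
  rw [← pvZeroTab a b n1 n2, pvAOuter_fold a b n1 n2 n1 (le_refl n1)]
  congr 1
  unfold pvGet2 pvTab
  rw [mapRange_getD _ _ _ _ (by omega)]
  simp only [le_refl, if_pos]
  rw [pvRow, mapRange_getD _ _ _ _ (by omega)]

-- ===== B-side: the stack machine computes pvL on demand ======================

-- every memo entry is a correct pvL value
def pvMemoOK (a b : List Char) (m : PySem.Dict (Nat × Nat) Int) : Prop :=
  ∀ i k v, m.get? (i, k) = some v → v = pvL a b i k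

-- the memo only grows
def pvSub (m m' : PySem.Dict (Nat × Nat) Int) : Prop :=
  ∀ p v, m.get? p = some v → m'.get? p = some v

-- direct subproblems of a cell (i, k) with i, k ≥ 1
def pvKids (a b : List Char) (i k : Nat) : List (Nat × Nat) :=
  if a.getD (i-1) ' ' == b.getD (k-1) ' ' then [(i-1, k-1)] else [(i-1, k), (i, k-1)]

-- every ready frame has all its subproblems either memoized or scheduled above it
def pvGood (a b : List Char) (m : PySem.Dict (Nat × Nat) Int) (st : List (Nat × Nat × Bool)) : Prop :=
  ∀ pre i k post, st = pre ++ (i, k, true) :: post →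
    ∀ c ∈ pvKids a b i k, (m.get? c).isSome = true ∨ c ∈ pre.map (fun e => (e.1, e.2.1))

theorem pvGood_mono (a b : List Char) {m m' : PySem.Dict (Nat × Nat) Int}
    {st : List (Nat × Nat × Bool)} (hsub : pvSub m m') (hG : pvGood a b m st) :
    pvGood a b m' st := by
  intro pre i k post hdec c hc
  rcases hG pre i k post hdec c hc with h | h
  · left
    rcases Option.isSome_iff_exists.mp h with ⟨v, hv⟩
    exact Option.isSome_iff_exists.mpr ⟨v, hsub _ _ hv⟩
  · right; exact h

-- popping a frame whose key is (now) memoized preserves pvGood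
theorem pvGood_pop (a b : List Char) {m : PySem.Dict (Nat × Nat) Int}
    {e : Nat × Nat × Bool} {st : List (Nat × Nat × Bool)}
    (hG : pvGood a b m (e :: st)) (he : (m.get? (e.1, e.2.1)).isSome = true) :
    pvGood a b m st := by
  intro pre i k post hdec c hc
  rcases hG (e :: pre) i k post (by rw [hdec]; rfl) c hc with h | h
  · left; exact h
  · simp only [List.map_cons, List.mem_cons] at h
    rcases h with h | h
    · left; rw [h]; exact he
    · right; exact h

-- inserting a fresh key preserves pvSub one step
theorem pvSub_insert {m : PySem.Dict (Nat × Nat) Int} {p : Nat × Nat} {v : Int}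
    (hnew : m.contains p = false) : pvSub m (m.insert p v) := by
  intro q w hq
  rw [PySem.Dict.get?_insert]
  split
  · rename_i hqp
    subst hqp
    rw [PySem.Dict.contains_eq_isSome_get?] at hnew
    rw [hq] at hnew
    simp at hnew
  · exact hq

theorem pvSub_trans {m1 m2 m3 : PySem.Dict (Nat × Nat) Int}
    (h12 : pvSub m1 m2) (h23 : pvSub m2 m3) : pvSub m1 m3 :=
  fun p v hv => h23 p v (h12 p v hv)

-- memo correctness survives inserting the correct value
theorem pvMemoOK_insert (a b : List Char) {m : PySem.Dict (Nat × Nat) Int}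
    {i k : Nat} {v : Int} (hI : pvMemoOK a b m) (hv : v = pvL a b i k) :
    pvMemoOK a b (m.insert (i, k) v) := by
  intro i' k' w hw
  rw [PySem.Dict.get?_insert] at hw
  split at hw
  · rename_i hp
    cases hw
    cases Prod.mk.injEq .. ▸ hp
    simp_all
  · exact hI i' k' w hw

-- unfolding equations for the while loop, one per branch
theorem pvRun_nil (a b : List Char) (m : PySem.Dict (Nat × Nat) Int) : pvRun a b [] m = m := by
  rw [pvRun]

theorem pvRun_pop (a b : List Char) (i k : Nat) (ready : Bool) (st : List (Nat × Nat × Bool))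
    (m : PySem.Dict (Nat × Nat) Int) (h : m.contains (i, k) = true) :
    pvRun a b ((i, k, ready) :: st) m = pvRun a b st m := by
  rw [pvRun.eq_def]; simp [h]

theorem pvRun_base (a b : List Char) (i k : Nat) (ready : Bool) (st : List (Nat × Nat × Bool))
    (m : PySem.Dict (Nat × Nat) Int) (h : ¬ m.contains (i, k) = true) (hz : i = 0 ∨ k = 0) :
    pvRun a b ((i, k, ready) :: st) m = pvRun a b st (m.insert (i, k) 0) := by
  rw [pvRun.eq_def]; simp [h, hz]

theorem pvRun_match_ready (a b : List Char) (i k : Nat) (st : List (Nat × Nat × Bool))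
    (m : PySem.Dict (Nat × Nat) Int) (h : ¬ m.contains (i, k) = true) (hz : ¬ (i = 0 ∨ k = 0))
    (hc : (a.getD (i-1) ' ' == b.getD (k-1) ' ') = true) :
    pvRun a b ((i, k, true) :: st) m = pvRun a b st (m.insert (i, k) (m.getD (i-1, k-1) 0 + 1)) := by
  have hc' : a.getD (i-1) ' ' = b.getD (k-1) ' ' := by simpa using hc
  simp only [List.getD_eq_getElem?_getD] at hc'
  rw [pvRun.eq_def]; simp [h, hz, hc']

theorem pvRun_match_push (a b : List Char) (i k : Nat) (st : List (Nat × Nat × Bool))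
    (m : PySem.Dict (Nat × Nat) Int) (h : ¬ m.contains (i, k) = true) (hz : ¬ (i = 0 ∨ k = 0))
    (hc : (a.getD (i-1) ' ' == b.getD (k-1) ' ') = true) :
    pvRun a b ((i, k, false) :: st) m = pvRun a b ((i-1, k-1, false) :: (i, k, true) :: st) m := by
  have hc' : a.getD (i-1) ' ' = b.getD (k-1) ' ' := by simpa using hc
  simp only [List.getD_eq_getElem?_getD] at hc'
  rw [pvRun.eq_def]; simp [h, hz, hc']

theorem pvRun_else_ready (a b : List Char) (i k : Nat) (st : List (Nat × Nat × Bool))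
    (m : PySem.Dict (Nat × Nat) Int) (h : ¬ m.contains (i, k) = true) (hz : ¬ (i = 0 ∨ k = 0))
    (hc : ¬ (a.getD (i-1) ' ' == b.getD (k-1) ' ') = true) :
    pvRun a b ((i, k, true) :: st) m = pvRun a b st (m.insert (i, k) (max (m.getD (i-1, k) 0) (m.getD (i, k-1) 0))) := by
  have hc' : ¬ a.getD (i-1) ' ' = b.getD (k-1) ' ' := by simpa using hc
  simp only [List.getD_eq_getElem?_getD] at hc'
  rw [pvRun.eq_def]; simp [h, hz, hc']

theorem pvRun_else_push (a b : List Char) (i k : Nat) (st : List (Nat × Nat × Bool))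
    (m : PySem.Dict (Nat × Nat) Int) (h : ¬ m.contains (i, k) = true) (hz : ¬ (i = 0 ∨ k = 0))
    (hc : ¬ (a.getD (i-1) ' ' == b.getD (k-1) ' ') = true) :
    pvRun a b ((i, k, false) :: st) m = pvRun a b ((i, k-1, false) :: (i-1, k, false) :: (i, k, true) :: st) m := by
  have hc' : ¬ a.getD (i-1) ' ' = b.getD (k-1) ' ' := by simpa using hc
  simp only [List.getD_eq_getElem?_getD] at hc'
  rw [pvRun.eq_def]; simp [h, hz, hc']

-- the main invariant: running the stack keeps the memo correct, only grows it,
-- and memoizes the key of every frame on the stack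
theorem pvRun_main (a b : List Char) : ∀ (st : List (Nat × Nat × Bool)) (m : PySem.Dict (Nat × Nat) Int),
    pvMemoOK a b m → pvGood a b m st →
      pvMemoOK a b (pvRun a b st m) ∧ pvSub m (pvRun a b st m) ∧
        ∀ e ∈ st, ((pvRun a b st m).get? (e.1, e.2.1)).isSome = true := by
  intro st m
  induction st, m using pvRun.induct a b with
  | case1 m =>
    intro hI _
    rw [pvRun_nil]
    exact ⟨hI, fun p v hv => hv, by simp⟩
  | case2 i k ready st m hmem ih =>
    intro hI hG
    rw [pvRun_pop a b i k ready st m hmem]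
    rw [PySem.Dict.contains_eq_isSome_get?] at hmem
    obtain ⟨hI', hS', hM'⟩ := ih hI (pvGood_pop a b hG hmem)
    refine ⟨hI', hS', ?_⟩
    intro e he
    rcases List.mem_cons.mp he with h | h
    · subst h
      rcases Option.isSome_iff_exists.mp hmem with ⟨v, hv⟩
      exact Option.isSome_iff_exists.mpr ⟨v, hS' _ _ hv⟩
    · exact hM' e h
  | case3 i k ready st m hmem hz ih =>
    intro hI hG
    rw [pvRun_base a b i k ready st m hmem hz]
    have hnew : m.contains (i, k) = false := by
      cases h : m.contains (i, k)
      · rfl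
      · exact absurd h hmem
    have hv : (0:Int) = pvL a b i k := by
      rcases hz with h | h
      · subst h; rw [pvL_zero_left]
      · subst h; rw [pvL_zero_right]
    have hI' := pvMemoOK_insert a b hI hv
    have hS1 : pvSub m (m.insert (i, k) 0) := pvSub_insert hnew
    have hG' : pvGood a b (m.insert (i, k) 0) st := by
      refine pvGood_pop a b (pvGood_mono a b hS1 hG) ?_
      simp [PySem.Dict.get?_insert_self]
    obtain ⟨hI'', hS', hM'⟩ := ih hI' hG'
    refine ⟨hI'', pvSub_trans hS1 hS', ?_⟩
    intro e he
    rcases List.mem_cons.mp he with h | h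
    · subst h
      exact Option.isSome_iff_exists.mpr
        ⟨0, hS' _ _ (by simp [PySem.Dict.get?_insert_self])⟩
    · exact hM' e h
  | case4 i k st m hmem hz hc ih =>
    -- match chars, ready = true: both programs read the memoized subproblem
    intro hI hG
    rw [pvRun_match_ready a b i k st m hmem hz hc]
    have hik : 1 ≤ i ∧ 1 ≤ k := by
      constructor <;> (by_contra hcon; exact hz (by omega))
    have hkid : ((m.get? (i-1, k-1)).isSome) = true := by
      rcases hG [] i k st rfl (i-1, k-1) (by rw [pvKids, if_pos hc]; simp) with h | h
      · exact h
      · simp at h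
    rcases Option.isSome_iff_exists.mp hkid with ⟨v, hv⟩
    have hveq : v = pvL a b (i-1) (k-1) := hI _ _ _ hv
    have hval : m.getD (i-1, k-1) 0 + 1 = pvL a b i k := by
      obtain ⟨i', rfl⟩ : ∃ i', i = i' + 1 := ⟨i - 1, by omega⟩
      obtain ⟨k', rfl⟩ : ∃ k', k = k' + 1 := ⟨k - 1, by omega⟩
      simp only [Nat.add_sub_cancel] at hv hveq hc ⊢
      rw [PySem.Dict.getD_eq_get?_getD, hv, pvL_succ, if_pos hc]
      simp [hveq]
    have hnew : m.contains (i, k) = false := by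
      cases h : m.contains (i, k)
      · rfl
      · exact absurd h hmem
    have hI' := pvMemoOK_insert a b hI hval
    have hS1 : pvSub m (m.insert (i, k) (m.getD (i-1, k-1) 0 + 1)) := pvSub_insert hnew
    have hG' : pvGood a b (m.insert (i, k) (m.getD (i-1, k-1) 0 + 1)) st := by
      refine pvGood_pop a b (pvGood_mono a b hS1 hG) ?_
      simp [PySem.Dict.get?_insert_self]
    obtain ⟨hI'', hS', hM'⟩ := ih hI' hG'
    refine ⟨hI'', pvSub_trans hS1 hS', ?_⟩
    intro e he
    rcases List.mem_cons.mp he with h | h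
    · subst h
      exact Option.isSome_iff_exists.mpr
        ⟨m.getD (i-1, k-1) 0 + 1, hS' _ _ (by simp [PySem.Dict.get?_insert_self])⟩
    · exact hM' e h
  | case5 i k st m hmem hz hc ih =>
    -- match chars, ready = false: schedule the subproblem then re-examine
    intro hI hG
    rw [pvRun_match_push a b i k st m hmem hz hc]
    have hG' : pvGood a b m ((i-1, k-1, false) :: (i, k, true) :: st) := by
      intro pre i' k' post hdec c hcmem
      rcases pre with _ | ⟨e1, _ | ⟨e2, pre'⟩⟩
      · simp at hdec
      · simp only [List.cons_append, List.nil_append, List.cons.injEq] at hdec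
        obtain ⟨he1, hik', hst⟩ := hdec
        have hik2 : i = i' ∧ k = k' := by
          have := hik'
          simp only [Prod.mk.injEq] at this
          exact ⟨this.1, this.2.1⟩
        obtain ⟨rfl, rfl⟩ := hik2
        rw [pvKids, if_pos hc] at hcmem
        simp only [List.mem_singleton] at hcmem
        right
        subst he1
        simp [hcmem]
      · simp only [List.cons_append, List.cons.injEq] at hdec
        obtain ⟨he1, he2, hst⟩ := hdec
        rcases hG ((i, k, false) :: pre') i' k' post (by rw [hst]; rfl) c hcmem with hL | hR
        · left; exact hL
        · right
          simp only [List.map_cons, List.mem_cons] at hR ⊢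
          rcases hR with h | h
          · right; left; rw [h, ← he2]
          · right; right; exact h
    obtain ⟨hI', hS', hM'⟩ := ih hI hG'
    refine ⟨hI', hS', ?_⟩
    intro e he
    rcases List.mem_cons.mp he with h | h
    · subst h
      exact hM' (i, k, true) (by simp)
    · exact hM' e (by simp [h])
  | case6 i k st m hmem hz hc ih =>
    -- differing chars, ready = true: both subproblems are memoized
    intro hI hG
    rw [pvRun_else_ready a b i k st m hmem hz hc]
    have hik : 1 ≤ i ∧ 1 ≤ k := by
      constructor <;> (by_contra hcon; exact hz (by omega))
    have hkids := hG [] i k st rfl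
    have hkid1 : ((m.get? (i-1, k)).isSome) = true := by
      rcases hkids (i-1, k) (by rw [pvKids, if_neg hc]; simp) with h | h
      · exact h
      · simp at h
    have hkid2 : ((m.get? (i, k-1)).isSome) = true := by
      rcases hkids (i, k-1) (by rw [pvKids, if_neg hc]; simp) with h | h
      · exact h
      · simp at h
    rcases Option.isSome_iff_exists.mp hkid1 with ⟨v1, hv1⟩
    rcases Option.isSome_iff_exists.mp hkid2 with ⟨v2, hv2⟩
    have hveq1 : v1 = pvL a b (i-1) k := hI _ _ _ hv1
    have hveq2 : v2 = pvL a b i (k-1) := hI _ _ _ hv2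
    have hval : max (m.getD (i-1, k) 0) (m.getD (i, k-1) 0) = pvL a b i k := by
      obtain ⟨i', rfl⟩ : ∃ i', i = i' + 1 := ⟨i - 1, by omega⟩
      obtain ⟨k', rfl⟩ : ∃ k', k = k' + 1 := ⟨k - 1, by omega⟩
      simp only [Nat.add_sub_cancel] at hv1 hv2 hveq1 hveq2 hc ⊢
      rw [PySem.Dict.getD_eq_get?_getD, PySem.Dict.getD_eq_get?_getD, hv1, hv2,
        pvL_succ, if_neg hc]
      simp only [Option.getD_some, hveq1, hveq2]
      exact max_comm _ _
    have hnew : m.contains (i, k) = false := by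
      cases h : m.contains (i, k)
      · rfl
      · exact absurd h hmem
    have hI' := pvMemoOK_insert a b hI hval
    have hS1 : pvSub m (m.insert (i, k) (max (m.getD (i-1, k) 0) (m.getD (i, k-1) 0))) := pvSub_insert hnew
    have hG' : pvGood a b (m.insert (i, k) (max (m.getD (i-1, k) 0) (m.getD (i, k-1) 0))) st := by
      refine pvGood_pop a b (pvGood_mono a b hS1 hG) ?_
      simp [PySem.Dict.get?_insert_self]
    obtain ⟨hI'', hS', hM'⟩ := ih hI' hG'
    refine ⟨hI'', pvSub_trans hS1 hS', ?_⟩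
    intro e he
    rcases List.mem_cons.mp he with h | h
    · subst h
      exact Option.isSome_iff_exists.mpr
        ⟨max (m.getD (i-1, k) 0) (m.getD (i, k-1) 0), hS' _ _ (by simp [PySem.Dict.get?_insert_self])⟩
    · exact hM' e h
  | case7 i k st m hmem hz hc ih =>
    -- differing chars, ready = false: schedule both subproblems then re-examine
    intro hI hG
    rw [pvRun_else_push a b i k st m hmem hz hc]
    have hG' : pvGood a b m ((i, k-1, false) :: (i-1, k, false) :: (i, k, true) :: st) := by
      intro pre i' k' post hdec c hcmem
      rcases pre with _ | ⟨e1, _ | ⟨e2, _ | ⟨e3, pre'⟩⟩⟩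
      · simp at hdec
      · simp only [List.cons_append, List.nil_append, List.cons.injEq] at hdec
        obtain ⟨-, h2, -⟩ := hdec
        simp only [Prod.mk.injEq] at h2
        exact absurd h2.2.2 (by simp)
      · simp only [List.cons_append, List.nil_append, List.cons.injEq] at hdec
        obtain ⟨he1, he2, hik', hst⟩ := hdec
        have hik2 : i = i' ∧ k = k' := by
          simp only [Prod.mk.injEq] at hik'
          exact ⟨hik'.1, hik'.2.1⟩
        obtain ⟨rfl, rfl⟩ := hik2
        rw [pvKids, if_neg hc] at hcmem
        right
        subst he1
        subst he2
        simp only [List.mem_cons, List.not_mem_nil, or_false] at hcmem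
        rcases hcmem with h | h <;> simp [h]
      · simp only [List.cons_append, List.cons.injEq] at hdec
        obtain ⟨he1, he2, he3, hst⟩ := hdec
        rcases hG ((i, k, false) :: pre') i' k' post (by rw [hst]; rfl) c hcmem with hL | hR
        · left; exact hL
        · right
          simp only [List.map_cons, List.mem_cons] at hR ⊢
          rcases hR with h | h
          · right; right; left; rw [h, ← he3]
          · right; right; right; exact h
    obtain ⟨hI', hS', hM'⟩ := ih hI hG'
    refine ⟨hI', hS', ?_⟩
    intro e he
    rcases List.mem_cons.mp he with h | h
    · subst h
      exact hM' (i, k, true) (by simp)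
    · exact hM' e (by simp [h])

-- B computes max(n1,n2) − pvL n1 n2
theorem steps_B_eq (line1 line2 : String) :
    steps_to_convert_alt line1 line2 =
      max (line1.toList.length : Int) (line2.toList.length : Int)
        - pvL line1.toList line2.toList line1.toList.length line2.toList.length := by
  simp only [steps_to_convert_alt]
  set a := line1.toList
  set b := line2.toList
  set n1 := a.length
  set n2 := b.length
  have hOK0 : pvMemoOK a b PySem.Dict.empty := by
    intro i k v hv
    simp [PySem.Dict.get?_empty] at hv
  have hGood0 : pvGood a b PySem.Dict.empty [(n1, n2, false)] := by
    intro pre i k post hdec c hcmem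
    rcases pre with _ | ⟨e, pre'⟩
    · simp at hdec
    · simp only [List.cons_append, List.cons.injEq] at hdec
      exact absurd hdec.2 (by simp)
  obtain ⟨hI, hS, hM⟩ := pvRun_main a b [(n1, n2, false)] PySem.Dict.empty hOK0 hGood0
  have hsome := hM (n1, n2, false) (by simp)
  rcases Option.isSome_iff_exists.mp hsome with ⟨v, hv⟩
  have hveq : v = pvL a b n1 n2 := hI _ _ _ hv
  rw [PySem.Dict.getD_eq_get?_getD, hv]
  simp [hveq]

-- ===== VERDICT (by name: the statement is the Claim_ definition above) =====
theorem steps_to_convert_spec : Claim_equal_steps_to_convert := by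
  intro line1 line2 _
  unfold Spec_steps_to_convert
  rw [steps_A_eq, steps_B_eq]
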